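-- pv_equiv track=rewrite | github.com/cltk/cltk | src/cltk/alphabet/text_normalization.py | split_leading_punct
-- ===== SOURCE A (Python) =====
-- from typing import List, Optional
--
-- def split_leading_punct(text: str, punctuation: Optional[List[str]] = None) -> str:
--     """Some tokenizers, including that in Stanza, do not always
--     handle punctuation properly. For example, an open curly
--     quote  (``"‘κατηγόρων’"``) is not split into an extra punctuation
--     token. This function does such splitting on raw text before
--     being sent to such a tokenizer.
--
--     Args:
--         text: Input text string.
--         punctuation: List of punctuation that should be split when before a word.
--
--     Returns:
--         Text string with leading punctuation separated by a whitespace character.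
--
--     >>> raw_text = "‘κατηγόρων’, οὐκ οἶδα: ἐγὼ δ᾽ οὖν"
--     >>> split_leading_punct(text=raw_text)
--     '‘ κατηγόρων’, οὐκ οἶδα: ἐγὼ δ᾽ οὖν'
--     """
--     if not punctuation:
--         punctuation = ["‘", "“"]  # opening curly quotes
--     new_chars: List[str] = list()
--     last_char_idx = len(text) - 1
--     for index, char in enumerate(text):
--         # If at end of string, don't split
--         if index == last_char_idx:
--             new_chars.append(char)
--             continue
--         next_char = text[index + 1]
--         # If there is already a whitespace ahead, do not add another
--         if next_char.isspace():
--             new_chars.append(char)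
--             continue
--         else:
--             if char in punctuation:
--                 new_chars.append(f"{char} ")
--             else:
--                 new_chars.append(char)
--     return "".join(new_chars)
-- ===== SOURCE B (Python) =====
-- from typing import List, Optional
--
-- def split_leading_punct(text: str, punctuation: Optional[List[str]] = None) -> str:
--     if not punctuation:
--         punctuation = ["\u2018", "\u201c"]
--     n = len(text)
--     cuts = set()
--     for p in punctuation:
--         if len(p) != 1:
--             continue
--         i = text.find(p)
--         while i != -1:
--             if i + 1 < n and not text[i + 1].isspace():
--                 cuts.add(i + 1)
--             i = text.find(p, i + 1)
--     bounds = [0] + sorted(cuts) + [n]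
--     return " ".join(text[a:b] for a, b in zip(bounds, bounds[1:]))
-- ===== Notes on version B (the rewrite author's own statement) =====
-- stated objective: alternative
-- what changed: Replaces A's single streaming pass (enumerate, text[index+1] lookahead, append char-by-char) with a two-phase plan: for each single-character punctuation entry a str.find loop collects the set of cut positions on the original text, the cuts are sorted, and the result is a space-join of the text slices between consecutive bounds.
import Mathlib
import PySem

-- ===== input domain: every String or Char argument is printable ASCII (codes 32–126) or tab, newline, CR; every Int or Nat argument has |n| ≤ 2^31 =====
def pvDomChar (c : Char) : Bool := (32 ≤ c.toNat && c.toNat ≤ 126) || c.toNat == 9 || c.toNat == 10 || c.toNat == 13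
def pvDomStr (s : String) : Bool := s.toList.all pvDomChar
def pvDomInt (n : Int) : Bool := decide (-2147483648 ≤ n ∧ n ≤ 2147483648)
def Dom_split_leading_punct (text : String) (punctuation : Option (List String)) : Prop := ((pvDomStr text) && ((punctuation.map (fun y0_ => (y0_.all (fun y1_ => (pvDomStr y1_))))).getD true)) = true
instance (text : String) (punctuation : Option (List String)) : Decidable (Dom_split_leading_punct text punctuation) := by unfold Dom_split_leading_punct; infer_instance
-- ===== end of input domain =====

-- B replaces A's per-character streaming pass (enumerate + next-char lookup + append-as-you-go) by a
-- two-phase plan: per punctuation entry, str.find loops collect the set of cut positions on the original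
-- text; the cuts are sorted and the answer is a space-join of the slices between consecutive bounds.
-- Same return value on the whole domain (objective: alternative decomposition, no speed claim).


-- ===== PORT A =====
def split_leading_punct (text : String) (punctuation : Option (List String)) : String :=
  -- if not punctuation: punctuation = ["‘", "“"]
  let punct : List String :=
    match punctuation with
    | none => ["‘", "“"]
    | some ps => if ps.isEmpty then ["‘", "“"] else ps
  let cs : List Char := text.toList
  let lastIdx : Int := PySem.Str.len text - 1
  let newChars : List String :=
    (PySem.List.enumerate cs).foldl (fun acc p =>
      if p.1 = lastIdx then
        acc ++ [String.ofList [p.2]]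
      else
        match PySem.Chars.pyGet? cs (p.1 + 1) with   -- next_char = text[index + 1] (never none here)
        | none => acc
        | some next =>
          if PySem.Chars.isspace next then
            acc ++ [String.ofList [p.2]]
          else if punct.contains (String.ofList [p.2]) then
            acc ++ [String.ofList [p.2, ' ']]
          else
            acc ++ [String.ofList [p.2]]) []
  PySem.Str.join "" newChars

-- ===== PORT B =====
-- while i != -1: maybe record the cut i+1; i = text.find(p, i+1).
-- fuel (cs.length + 1) only makes the loop total: the found index strictly increases and is < len,
-- so the fuel is never exhausted before find returns -1.
def pvFindLoop (cs sub : List Char) : Nat → Int → PySem.Set Int → PySem.Set Int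
  | 0, _, cuts => cuts
  | fuel+1, i, cuts =>
    if i = -1 then cuts
    else
      let cuts' :=
        if i + 1 < (cs.length : Int) then
          match PySem.Chars.pyGet? cs (i + 1) with     -- text[i + 1]
          | some c => if !(PySem.Chars.isspace c) then PySem.Set.add cuts (i + 1) else cuts
          | none => cuts
        else cuts
      pvFindLoop cs sub fuel (PySem.Chars.findFrom cs sub (i + 1) none) cuts'

def split_leading_punct_alt (text : String) (punctuation : Option (List String)) : String :=
  let punct : List String :=
    match punctuation with
    | none => ["‘", "“"]
    | some ps => if ps.isEmpty then ["‘", "“"] else ps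
  let cs : List Char := text.toList
  let n : Int := (cs.length : Int)
  let cuts : PySem.Set Int := punct.foldl (fun cuts p =>
      if PySem.Str.len p ≠ 1 then cuts
      else pvFindLoop cs p.toList (cs.length + 1) (PySem.Chars.find cs p.toList) cuts)
    PySem.Set.empty
  let bounds : List Int := 0 :: PySem.List.sorted cuts (fun x => x) false ++ [n]
  PySem.Str.join " " ((bounds.zip bounds.tail).map (fun ab =>
      String.ofList (PySem.Chars.slice cs (some ab.1) (some ab.2))))

-- ===== PRECONDITION & SPEC =====
def Spec_split_leading_punct (text : String) (punctuation : Option (List String)) (out : String) : Prop := out = split_leading_punct_alt text punctuation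
instance (text : String) (punctuation : Option (List String)) (out : String) : Decidable (Spec_split_leading_punct text punctuation out) := by unfold Spec_split_leading_punct; infer_instance

-- ===== CLAIM (what is proved, stated in full; the proofs are below) =====
def Claim_equal_split_leading_punct : Prop := ∀ (text : String) (punctuation : Option (List String)), Dom_split_leading_punct text punctuation → Spec_split_leading_punct text punctuation (split_leading_punct text punctuation)

-- ===== LEMMAS AND PROOFS =====

-- c is punctuation (the membership test A performs per character)
def pvSP (P : List String) (c : Char) : Bool := P.contains (String.ofList [c])

-- j is a cut position: 1 ≤ j < |cs|, cs[j-1] is punctuation, cs[j] is not whitespace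
def pvCutB (P : List String) (cs : List Char) (j : Nat) : Bool :=
  decide (1 ≤ j) && decide (j < cs.length) && pvSP P (cs.getD (j-1) ' ') && !(PySem.Chars.isspace (cs.getD j ' '))

-- canonical char-level result both programs compute
def pvF (P : List String) : List Char → List Char
  | [] => []
  | [c] => [c]
  | c :: d :: r => c :: ((if pvSP P c && !(PySem.Chars.isspace d) then [' '] else []) ++ pvF P (d :: r))

-- the increasing list of cut positions in (a, a+d]
def pvCutsFrom (P : List String) (cs : List Char) : Nat → Nat → List Nat
  | 0, _ => []
  | d+1, a => if pvCutB P cs (a+1) then (a+1) :: pvCutsFrom P cs d (a+1) else pvCutsFrom P cs d (a+1)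

-- insert a space before each listed position, starting from offset a
def pvSplice (cs : List Char) : Nat → List Nat → List Char
  | a, [] => cs.drop a
  | a, j :: t => (cs.drop a).take (j - a) ++ ' ' :: pvSplice cs j t

-- A-side pieces (one string per input character)
def pvPieces (P : List String) : List Char → List String
  | [] => []
  | [c] => [String.ofList [c]]
  | c :: c2 :: rs =>
      (if P.contains (String.ofList [c]) && !(PySem.Chars.isspace c2) then
        String.ofList [c, ' ']
      else
        String.ofList [c]) :: pvPieces P (c2 :: rs)

theorem pvJoinNil : ∀ (xss : List (List Char)), PySem.Chars.join [] xss = xss.flatten := by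
  intro xss
  induction xss with
  | nil => simp [PySem.Chars.join_nil]
  | cons x r ih =>
    cases r with
    | nil => simp [PySem.Chars.join_singleton]
    | cons y t => rw [PySem.Chars.join_cons_cons]; simp [ih]

theorem pvLoopA (punct : List String) (cs : List Char) :
    ∀ (rest : List Char) (k : Nat), rest = cs.drop k → ∀ (acc : List String),
    (PySem.List.enumerate rest (k : Int)).foldl
      (fun acc p =>
        if p.1 = (cs.length : Int) - 1 then
          acc ++ [String.ofList [p.2]]
        else
          match PySem.Chars.pyGet? cs (p.1 + 1) with
          | none => acc
          | some next =>
            if PySem.Chars.isspace next then acc ++ [String.ofList [p.2]]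
            else if punct.contains (String.ofList [p.2]) then acc ++ [String.ofList [p.2, ' ']]
            else acc ++ [String.ofList [p.2]]) acc
      = acc ++ pvPieces punct rest := by
  intro rest
  induction rest with
  | nil => intro k h acc; simp [PySem.List.enumerate_nil, pvPieces]
  | cons c rest' ih =>
    intro k h acc
    have hlen : rest'.length + 1 = cs.length - k := by
      have := congrArg List.length h
      simpa using this
    have hk : k < cs.length := by
      by_contra hge
      have hnil : cs.drop k = [] := List.drop_eq_nil_of_le (by omega)
      rw [hnil] at h
      simp at h
    rw [PySem.List.enumerate_cons, List.foldl_cons]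
    cases rest' with
    | nil =>
      have hlen1 : cs.length = k + 1 := by
        simp only [List.length_nil] at hlen
        omega
      have hidx : (k : Int) = (cs.length : Int) - 1 := by omega
      simp [hidx, PySem.List.enumerate_nil, pvPieces]
    | cons c2 rs =>
      have hlen2 : cs.length - k = rs.length + 2 := by
        simp only [List.length_cons] at hlen; omega
      have hidx : ¬ ((k : Int) = (cs.length : Int) - 1) := by omega
      have hget : PySem.Chars.pyGet? cs ((k : Int) + 1) = some c2 := by
        have h1 : ((k : Int) + 1) = ((k + 1 : Nat) : Int) := by push_cast; ring
        rw [PySem.Chars.pyGet?_eq_listPyGet?, h1, PySem.List.pyGet?_natCast]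
        have : cs[k + 1]? = (cs.drop k)[1]? := by
          rw [List.getElem?_drop]
        rw [this, ← h]
        rfl
      have htail : c2 :: rs = cs.drop (k + 1) := by
        have := List.tail_drop (l := cs) (i := k)
        rw [← h] at this
        simpa using this
      have hstep : ((k : Int) + 1) = ((k + 1 : Nat) : Int) := by push_cast; ring
      rw [if_neg hidx, hget, hstep, ih (k + 1) htail]
      by_cases hs : PySem.Chars.isspace c2 <;>
        by_cases hc : String.ofList [c] ∈ punct <;>
          simp [hs, hc, pvPieces]

theorem pvPieces_flatten (P : List String) : ∀ (cs : List Char),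
    ((pvPieces P cs).map String.toList).flatten = pvF P cs := by
  intro cs
  induction cs with
  | nil => rfl
  | cons c rest ih =>
    cases rest with
    | nil => simp [pvPieces, pvF]
    | cons d r =>
      simp only [pvPieces, pvF, pvSP] at *
      by_cases hm : String.ofList [c] ∈ P <;> by_cases hs : PySem.Chars.isspace d <;>
        simp [hm, hs, ih]

-- membership in pvCutsFrom
theorem pvMemCutsFrom (P : List String) (cs : List Char) :
    ∀ (d a : Nat) (j : Nat), j ∈ pvCutsFrom P cs d a ↔ (a < j ∧ j ≤ a + d ∧ pvCutB P cs j = true) := by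
  intro d
  induction d with
  | zero =>
    intro a j
    simp only [pvCutsFrom, List.not_mem_nil, false_iff]
    rintro ⟨h1, h2, _⟩; omega
  | succ d ih =>
    intro a j
    simp only [pvCutsFrom]
    by_cases hc : pvCutB P cs (a+1) = true
    · rw [if_pos hc]
      simp only [List.mem_cons, ih]
      constructor
      · rintro (rfl | ⟨h1, h2, h3⟩)
        · exact ⟨by omega, by omega, hc⟩
        · exact ⟨by omega, by omega, h3⟩
      · rintro ⟨h1, h2, h3⟩
        by_cases hj : j = a + 1
        · exact Or.inl hj
        · exact Or.inr ⟨by omega, by omega, h3⟩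
    · rw [if_neg hc]
      rw [ih]
      constructor
      · rintro ⟨h1, h2, h3⟩; exact ⟨by omega, by omega, h3⟩
      · rintro ⟨h1, h2, h3⟩
        by_cases hj : j = a + 1
        · exact absurd (hj ▸ h3) hc
        · exact ⟨by omega, by omega, h3⟩

theorem pvPairwiseCutsFrom (P : List String) (cs : List Char) :
    ∀ (d a : Nat), (pvCutsFrom P cs d a).Pairwise (· < ·) := by
  intro d
  induction d with
  | zero => intro a; simp [pvCutsFrom]
  | succ d ih =>
    intro a
    simp only [pvCutsFrom]
    by_cases hc : pvCutB P cs (a+1) = true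
    · rw [if_pos hc, List.pairwise_cons]
      refine ⟨fun x hx => ?_, ih (a+1)⟩
      exact ((pvMemCutsFrom P cs d (a+1) x).mp hx).1
    · rw [if_neg hc]; exact ih (a+1)

-- splice of the cut list is the canonical result
theorem pvSpliceStep (cs : List Char) (a : Nat) (js : List Nat) (ha : a < cs.length)
    (hjs : ∀ j ∈ js, a + 1 < j) :
    pvSplice cs a js = cs[a] :: pvSplice cs (a+1) js := by
  cases js with
  | nil =>
    show cs.drop a = cs[a] :: cs.drop (a+1)
    exact List.drop_eq_getElem_cons ha
  | cons j t =>
    have hj : a + 1 < j := hjs j (List.mem_cons_self)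
    show (cs.drop a).take (j - a) ++ ' ' :: pvSplice cs j t
        = cs[a] :: ((cs.drop (a+1)).take (j - (a+1)) ++ ' ' :: pvSplice cs j t)
    rw [List.drop_eq_getElem_cons ha, show j - a = (j - (a+1)) + 1 by omega, List.take_succ_cons]
    rfl

theorem pvSpliceCutsFrom (P : List String) (cs : List Char) :
    ∀ (d a : Nat), cs.length ≤ a + d →
      pvSplice cs a (pvCutsFrom P cs d a) = pvF P (cs.drop a) := by
  intro d
  induction d with
  | zero =>
    intro a h
    have hnil : cs.drop a = [] := List.drop_eq_nil_of_le (by omega)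
    show cs.drop a = pvF P (cs.drop a)
    rw [hnil]; rfl
  | succ d ih =>
    intro a h
    simp only [pvCutsFrom]
    by_cases hc : pvCutB P cs (a+1) = true
    · rw [if_pos hc]
      have hcb := hc
      unfold pvCutB at hcb
      simp only [Bool.and_eq_true, decide_eq_true_eq, Bool.not_eq_true'] at hcb
      obtain ⟨⟨⟨-, hlt⟩, hsp⟩, hns⟩ := hcb
      have ha : a < cs.length := by omega
      show (cs.drop a).take (a + 1 - a) ++ ' ' :: pvSplice cs (a+1) (pvCutsFrom P cs d (a+1))
          = pvF P (cs.drop a)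
      rw [show a + 1 - a = 1 by omega, List.drop_eq_getElem_cons ha, List.take_succ_cons,
        List.take_zero, ih (a+1) (by omega), List.drop_eq_getElem_cons hlt]
      simp only [pvF]
      have e1 : cs.getD (a + 1 - 1) ' ' = cs[a] := by
        rw [show a + 1 - 1 = a by omega]; exact List.getD_eq_getElem cs ' ' ha
      have e2 : cs.getD (a+1) ' ' = cs[a+1] := List.getD_eq_getElem cs ' ' hlt
      rw [e1] at hsp
      rw [e2] at hns
      simp [hsp, hns]
    · rw [if_neg hc]
      by_cases ha : a < cs.length
      · rw [pvSpliceStep cs a (pvCutsFrom P cs d (a+1)) ha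
            (fun j hj => ((pvMemCutsFrom P cs d (a+1) j).mp hj).1),
          ih (a+1) (by omega), List.drop_eq_getElem_cons ha]
        by_cases h2 : a + 1 < cs.length
        · rw [List.drop_eq_getElem_cons h2]
          simp only [pvF]
          have hcond : (pvSP P cs[a] && !(PySem.Chars.isspace cs[a+1])) = false := by
            by_contra hne
            apply hc
            unfold pvCutB
            have e1 : cs.getD (a + 1 - 1) ' ' = cs[a] := by
              rw [show a + 1 - 1 = a by omega]; exact List.getD_eq_getElem cs ' ' ha
            have e2 : cs.getD (a+1) ' ' = cs[a+1] := List.getD_eq_getElem cs ' ' h2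
            rw [e1, e2]
            simp only [Bool.not_eq_false] at hne
            simp [hne, h2]
          rw [hcond]
          simp
        · have hnil : cs.drop (a+1) = [] := List.drop_eq_nil_of_le (by omega)
          rw [hnil]
          rfl
      · have hjs : pvCutsFrom P cs d (a+1) = [] := by
          apply List.eq_nil_iff_forall_not_mem.mpr
          intro j hj
          obtain ⟨h1, h2, h3⟩ := (pvMemCutsFrom P cs d (a+1) j).mp hj
          unfold pvCutB at h3
          simp only [Bool.and_eq_true, decide_eq_true_eq] at h3
          omega
        have hnil : cs.drop a = [] := List.drop_eq_nil_of_le (by omega)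
        rw [hjs]
        show cs.drop a = pvF P (cs.drop a)
        rw [hnil]; rfl

-- join " " of the slices at bounds a :: js ++ [len] is the splice
theorem pvJoinSplice (cs : List Char) :
    ∀ (js : List Nat) (a : Nat),
      PySem.Chars.join [' ']
        (((a :: js ++ [cs.length]).zip (js ++ [cs.length])).map
          (fun ab => (cs.drop ab.1).take (ab.2 - ab.1)))
        = pvSplice cs a js := by
  intro js
  induction js with
  | nil =>
    intro a
    have h0 : ((a :: ([] : List Nat) ++ [cs.length]).zip (([] : List Nat) ++ [cs.length])).map
        (fun ab => (cs.drop ab.1).take (ab.2 - ab.1)) = [(cs.drop a).take (cs.length - a)] := rfl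
    rw [h0, PySem.Chars.join_singleton]
    show (cs.drop a).take (cs.length - a) = cs.drop a
    exact List.take_of_length_le (by simp)
  | cons j t ih =>
    intro a
    have hsplit : ((a :: (j :: t) ++ [cs.length]).zip ((j :: t) ++ [cs.length])).map
        (fun ab => (cs.drop ab.1).take (ab.2 - ab.1))
        = ((cs.drop a).take (j - a)) :: ((j :: t ++ [cs.length]).zip (t ++ [cs.length])).map
            (fun ab => (cs.drop ab.1).take (ab.2 - ab.1)) := rfl
    rw [hsplit]
    obtain ⟨y, ys, hys⟩ := List.exists_cons_of_ne_nil
      (l := (((j :: t ++ [cs.length]).zip (t ++ [cs.length])).map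
        (fun ab => (cs.drop ab.1).take (ab.2 - ab.1)))) (by cases t <;> simp)
    rw [hys, PySem.Chars.join_cons_cons, ← hys, ih j]
    show (cs.drop a).take (j - a) ++ [' '] ++ pvSplice cs j t = pvSplice cs a (j :: t)
    simp [pvSplice]

-- the find loop collects exactly the qualifying cuts at occurrences ≥ k
theorem pvSinglePrefix (cs : List Char) (j : Nat) (pc : Char) :
    [pc] <+: cs.drop j ↔ (j < cs.length ∧ cs.getD j ' ' = pc) := by
  constructor
  · rintro ⟨t, ht⟩
    have hlen : j < cs.length := by
      have := congrArg List.length ht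
      simp only [List.length_append, List.length_cons, List.length_nil, List.length_drop] at this
      omega
    rw [List.drop_eq_getElem_cons hlen] at ht
    have hpc : pc = cs[j] := by
      have := List.cons.injEq pc (([] : List Char) ++ t) cs[j] (cs.drop (j+1))
      simp only [List.cons_append, List.nil_append] at ht
      exact (List.cons.inj ht).1
    exact ⟨hlen, by rw [List.getD_eq_getElem cs ' ' hlen, ← hpc]⟩
  · rintro ⟨h1, h2⟩
    rw [List.getD_eq_getElem cs ' ' h1] at h2
    exact ⟨cs.drop (j+1), by rw [List.drop_eq_getElem_cons h1, ← h2]; rfl⟩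

theorem pvSingleInfix (cs : List Char) (k j : Nat) (pc : Char) (hkj : k ≤ j)
    (h : [pc] <+: cs.drop j) : [pc] <:+: cs.drop k := by
  have hd : cs.drop j = (cs.drop k).drop (j - k) := by
    rw [List.drop_drop]; congr 1; omega
  rw [hd] at h
  exact h.isInfix.trans (List.drop_suffix (j - k) (cs.drop k)).isInfix

theorem pvFindLoopMem (cs : List Char) (pc : Char) :
    ∀ (fuel k : Nat) (cuts : PySem.Set Int), k ≤ cs.length → cs.length + 1 - k ≤ fuel →
      ∀ x, x ∈ pvFindLoop cs [pc] fuel (PySem.Chars.findFrom cs [pc] (k : Int) none) cuts ↔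
        (x ∈ cuts ∨ ∃ j : Nat, k ≤ j ∧ j + 1 < cs.length ∧ cs.getD j ' ' = pc ∧
          PySem.Chars.isspace (cs.getD (j+1) ' ') = false ∧ x = ((j : Int) + 1)) := by
  intro fuel
  induction fuel with
  | zero => intro k cuts hk hf; omega
  | succ fuel ih =>
    intro k cuts hk hf x
    by_cases hfind : PySem.Chars.findFrom cs [pc] (k : Int) none = -1
    · rw [hfind]
      have hnot : ¬ [pc] <:+: cs.drop k :=
        (PySem.Chars.findFrom_natCast_eq_neg_one_iff cs [pc] k hk).mp hfind
      simp only [pvFindLoop]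
      constructor
      · exact Or.inl
      · rintro (hx | ⟨j, hj1, hj2, hj3, -, -⟩)
        · exact hx
        · exact absurd (pvSingleInfix cs k j pc hj1
            ((pvSinglePrefix cs j pc).mpr ⟨by omega, hj3⟩)) hnot
    · obtain ⟨hge, hpre, hmin⟩ := PySem.Chars.findFrom_natCast_spec cs [pc] k hk hfind
      set i := PySem.Chars.findFrom cs [pc] (k : Int) none with hi
      have hipos : (0 : Int) ≤ i := le_trans (by positivity) hge
      obtain ⟨hilt, hipc⟩ := (pvSinglePrefix cs i.toNat pc).mp hpre
      have hcast : i + 1 = ((i.toNat + 1 : Nat) : Int) := by omega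
      have hk' : i.toNat + 1 ≤ cs.length := by omega
      have hkle : k ≤ i.toNat := by omega
      have hf' : cs.length + 1 - (i.toNat + 1) ≤ fuel := by omega
      have hstep : ∀ cuts0, pvFindLoop cs [pc] (fuel+1) i cuts0
          = pvFindLoop cs [pc] fuel (PySem.Chars.findFrom cs [pc] (i + 1) none)
            (if i + 1 < (cs.length : Int) then
              match PySem.Chars.pyGet? cs (i + 1) with
              | some c => if !(PySem.Chars.isspace c) then PySem.Set.add cuts0 (i + 1) else cuts0
              | none => cuts0
            else cuts0) := by
        intro cuts0
        simp only [pvFindLoop, if_neg hfind]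
      rw [hstep cuts, hcast, ih (i.toNat + 1) _ hk' hf' x]
      -- now reason about cuts'
      by_cases hlt : i.toNat + 1 < cs.length
      · have hltI : ((i.toNat + 1 : Nat) : Int) < (cs.length : Int) := by exact_mod_cast hlt
        have hget : PySem.Chars.pyGet? cs ((i.toNat + 1 : Nat) : Int) = some cs[i.toNat + 1] := by
          rw [PySem.Chars.pyGet?_eq_listPyGet?, PySem.List.pyGet?_natCast]
          exact List.getElem?_eq_getElem hlt
        rw [if_pos hltI, hget]
        dsimp only
        have hgd : cs.getD (i.toNat + 1) ' ' = cs[i.toNat + 1] :=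
          List.getD_eq_getElem cs ' ' hlt
        by_cases hsp : PySem.Chars.isspace cs[i.toNat + 1] = true
        · rw [show (if (!PySem.Chars.isspace cs[i.toNat + 1]) = true
              then cuts.add ((i.toNat + 1 : Nat) : Int) else cuts) = cuts by simp [hsp]]
          constructor
          · rintro (hx | ⟨j, hj1, hj2, hj3, hj4, hj5⟩)
            · exact Or.inl hx
            · exact Or.inr ⟨j, by omega, hj2, hj3, hj4, hj5⟩
          · rintro (hx | ⟨j, hj1, hj2, hj3, hj4, hj5⟩)
            · exact Or.inl hx
            · by_cases hji : j ≤ i.toNat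
              · by_cases hje : j = i.toNat
                · subst hje
                  rw [hgd] at hj4
                  rw [hsp] at hj4
                  exact absurd hj4 (by simp)
                · exact absurd ((pvSinglePrefix cs j pc).mpr ⟨by omega, hj3⟩)
                    (hmin j hj1 (by omega))
              · exact Or.inr ⟨j, by omega, hj2, hj3, hj4, hj5⟩
        · have hspf : PySem.Chars.isspace cs[i.toNat + 1] = false := by
            simpa using hsp
          rw [show (if (!PySem.Chars.isspace cs[i.toNat + 1]) = true
              then cuts.add ((i.toNat + 1 : Nat) : Int) else cuts)
              = cuts.add ((i.toNat + 1 : Nat) : Int) by simp [hspf]]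
          constructor
          · rintro (hx | ⟨j, hj1, hj2, hj3, hj4, hj5⟩)
            · rcases (PySem.Set.mem_add cuts ((i.toNat + 1 : Nat) : Int) x).mp hx with hx' | hx'
              · exact Or.inl hx'
              · exact Or.inr ⟨i.toNat, hkle, hlt, hipc, by rw [hgd]; exact hspf,
                  by rw [hx']; push_cast; ring⟩
            · exact Or.inr ⟨j, by omega, hj2, hj3, hj4, hj5⟩
          · rintro (hx | ⟨j, hj1, hj2, hj3, hj4, hj5⟩)
            · exact Or.inl ((PySem.Set.mem_add cuts ((i.toNat + 1 : Nat) : Int) x).mpr (Or.inl hx))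
            · by_cases hji : j ≤ i.toNat
              · by_cases hje : j = i.toNat
                · subst hje
                  exact Or.inl ((PySem.Set.mem_add cuts ((i.toNat + 1 : Nat) : Int) x).mpr
                    (Or.inr (by rw [hj5]; push_cast; ring)))
                · exact absurd ((pvSinglePrefix cs j pc).mpr ⟨by omega, hj3⟩)
                    (hmin j hj1 (by omega))
              · exact Or.inr ⟨j, by omega, hj2, hj3, hj4, hj5⟩
      · have hltI : ¬ (((i.toNat + 1 : Nat) : Int) < (cs.length : Int)) := by exact_mod_cast hlt
        rw [if_neg hltI]
        constructor
        · rintro (hx | ⟨j, hj1, hj2, hj3, hj4, hj5⟩)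
          · exact Or.inl hx
          · exact Or.inr ⟨j, by omega, hj2, hj3, hj4, hj5⟩
        · rintro (hx | ⟨j, hj1, hj2, hj3, hj4, hj5⟩)
          · exact Or.inl hx
          · by_cases hji : j ≤ i.toNat
            · by_cases hje : j = i.toNat
              · omega
              · exact absurd ((pvSinglePrefix cs j pc).mpr ⟨by omega, hj3⟩)
                  (hmin j hj1 (by omega))
            · exact Or.inr ⟨j, by omega, hj2, hj3, hj4, hj5⟩

theorem pvFindLoopNodup (cs sub : List Char) :
    ∀ (fuel : Nat) (i : Int) (cuts : PySem.Set Int), cuts.Nodup →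
      (pvFindLoop cs sub fuel i cuts).Nodup := by
  intro fuel
  induction fuel with
  | zero => intro i cuts h; exact h
  | succ fuel ih =>
    intro i cuts h
    by_cases hi : i = -1
    · simp only [pvFindLoop, if_pos hi]; exact h
    · simp only [pvFindLoop, if_neg hi]
      apply ih
      by_cases hc : i + 1 < (cs.length : Int)
      · rw [if_pos hc]
        cases hg : PySem.Chars.pyGet? cs (i+1) with
        | none => exact h
        | some c =>
          dsimp only
          by_cases hs : (!PySem.Chars.isspace c) = true
          · rw [if_pos hs]; exact PySem.Set.nodup_add cuts _ h
          · rw [if_neg hs]; exact h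
      · rw [if_neg hc]; exact h

-- the fold over the punctuation entries collects exactly the cut positions
theorem pvFoldMem (cs : List Char) (P : List String) :
    ∀ x, x ∈ (P.foldl (fun cuts p =>
        if PySem.Str.len p ≠ 1 then cuts
        else pvFindLoop cs p.toList (cs.length + 1) (PySem.Chars.find cs p.toList) cuts)
      PySem.Set.empty) ↔ ∃ m : Nat, pvCutB P cs m = true ∧ x = (m : Int) := by
  have aux : ∀ (ps : List String) (acc : PySem.Set Int) (x : Int),
      x ∈ (ps.foldl (fun cuts p =>
        if PySem.Str.len p ≠ 1 then cuts
        else pvFindLoop cs p.toList (cs.length + 1) (PySem.Chars.find cs p.toList) cuts) acc) ↔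
      (x ∈ acc ∨ ∃ p ∈ ps, ∃ c : Char, p.toList = [c] ∧ ∃ j : Nat, j + 1 < cs.length ∧
        cs.getD j ' ' = c ∧ PySem.Chars.isspace (cs.getD (j+1) ' ') = false ∧
        x = ((j : Int) + 1)) := by
    intro ps
    induction ps with
    | nil => intro acc x; simp
    | cons p ps ih =>
      intro acc x
      rw [List.foldl_cons]
      by_cases hp : PySem.Str.len p ≠ 1
      · rw [if_pos hp, ih]
        have hnot : ∀ c : Char, p.toList ≠ [c] := by
          intro c hcc
          apply hp
          rw [PySem.Str.len_eq, hcc]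
          rfl
        constructor
        · rintro (hx | ⟨q, hq, rest⟩)
          · exact Or.inl hx
          · exact Or.inr ⟨q, List.mem_cons_of_mem p hq, rest⟩
        · rintro (hx | ⟨q, hq, c, hc, rest⟩)
          · exact Or.inl hx
          · rcases List.mem_cons.mp hq with rfl | hq'
            · exact absurd hc (hnot c)
            · exact Or.inr ⟨q, hq', c, hc, rest⟩
      · rw [if_neg hp]
        rw [not_not] at hp
        have hlen : p.toList.length = 1 := by
          rw [PySem.Str.len_eq] at hp
          exact_mod_cast hp
        obtain ⟨c, hc⟩ := List.length_eq_one_iff.mp hlen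
        rw [hc, ← PySem.Chars.findFrom_zero]
        have h0 : ((0 : Nat) : Int) = (0 : Int) := rfl
        rw [← h0, ih,
          pvFindLoopMem cs c (cs.length + 1) 0 acc (Nat.zero_le _) (by omega) x]
        constructor
        · rintro ((hx | ⟨j, -, hj2, hj3, hj4, hj5⟩) | ⟨q, hq, rest⟩)
          · exact Or.inl hx
          · exact Or.inr ⟨p, List.mem_cons_self, c, hc, j, hj2, hj3, hj4, hj5⟩
          · exact Or.inr ⟨q, List.mem_cons_of_mem p hq, rest⟩
        · rintro (hx | ⟨q, hq, c', hc', j, hj2, hj3, hj4, hj5⟩)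
          · exact Or.inl (Or.inl hx)
          · rcases List.mem_cons.mp hq with rfl | hq'
            · rw [hc] at hc'
              have : c' = c := by injection hc' with h1 _; exact h1.symm
              subst this
              exact Or.inl (Or.inr ⟨j, Nat.zero_le _, hj2, hj3, hj4, hj5⟩)
            · exact Or.inr ⟨q, hq', c', hc', j, hj2, hj3, hj4, hj5⟩
  intro x
  rw [aux P PySem.Set.empty x]
  constructor
  · rintro (hx | ⟨p, hp, c, hc, j, hj2, hj3, hj4, hj5⟩)
    · exact absurd hx (List.not_mem_nil)
    · refine ⟨j + 1, ?_, by rw [hj5]; push_cast; ring⟩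
      have hpc : p = String.ofList [c] := by
        apply String.toList_inj.mp
        rw [hc, String.toList_ofList]
      unfold pvCutB pvSP
      have e1 : j + 1 - 1 = j := by omega
      rw [e1, hj3]
      simp only [Bool.and_eq_true, decide_eq_true_eq, Bool.not_eq_true']
      exact ⟨⟨⟨by omega, by omega⟩, by rw [← hpc]; exact List.elem_eq_true_of_mem hp⟩, hj4⟩
  · rintro ⟨m, hm, rfl⟩
    unfold pvCutB pvSP at hm
    simp only [Bool.and_eq_true, decide_eq_true_eq, Bool.not_eq_true'] at hm
    obtain ⟨⟨⟨hm1, hm2⟩, hm3⟩, hm4⟩ := hm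
    refine Or.inr ⟨String.ofList [cs.getD (m-1) ' '], ?_, cs.getD (m-1) ' ',
      String.toList_ofList, m - 1, by omega, rfl, ?_, by omega⟩
    · exact List.mem_of_elem_eq_true hm3
    · rw [show m - 1 + 1 = m by omega]
      exact hm4

theorem pvFoldNodup (cs : List Char) (P : List String) :
    (P.foldl (fun cuts p =>
        if PySem.Str.len p ≠ 1 then cuts
        else pvFindLoop cs p.toList (cs.length + 1) (PySem.Chars.find cs p.toList) cuts)
      PySem.Set.empty).Nodup := by
  have aux : ∀ (ps : List String) (acc : PySem.Set Int), acc.Nodup →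
      (ps.foldl (fun cuts p =>
        if PySem.Str.len p ≠ 1 then cuts
        else pvFindLoop cs p.toList (cs.length + 1) (PySem.Chars.find cs p.toList) cuts) acc).Nodup := by
    intro ps
    induction ps with
    | nil => intro acc h; exact h
    | cons p ps ih =>
      intro acc h
      rw [List.foldl_cons]
      apply ih
      by_cases hp : PySem.Str.len p ≠ 1
      · rw [if_pos hp]; exact h
      · rw [if_neg hp]; exact pvFindLoopNodup cs p.toList _ _ acc h
  exact aux P PySem.Set.empty List.nodup_nil

theorem pvSortedCuts (cs : List Char) (P : List String) :
    PySem.List.sorted (P.foldl (fun cuts p =>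
        if PySem.Str.len p ≠ 1 then cuts
        else pvFindLoop cs p.toList (cs.length + 1) (PySem.Chars.find cs p.toList) cuts)
      PySem.Set.empty) (fun x => x) false
    = (pvCutsFrom P cs cs.length 0).map (fun j : Nat => (j : Int)) := by
  have hpairN := pvPairwiseCutsFrom P cs cs.length 0
  have hpair : ((pvCutsFrom P cs cs.length 0).map (fun j : Nat => (j : Int))).Pairwise
      (fun a b => a < b) := by
    rw [List.pairwise_map]
    refine hpairN.imp ?_
    intro a b h
    exact_mod_cast h
  have hysnd : ((pvCutsFrom P cs cs.length 0).map (fun j : Nat => (j : Int))).Nodup :=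
    hpair.imp (fun h => ne_of_lt h)
  apply PySem.List.sorted_eq_of_perm_of_pairwise_lt
  · apply (List.perm_ext_iff_of_nodup hysnd (pvFoldNodup cs P)).mpr
    intro x
    rw [List.mem_map, pvFoldMem cs P x]
    constructor
    · rintro ⟨j, hj, rfl⟩
      exact ⟨j, ((pvMemCutsFrom P cs cs.length 0 j).mp hj).2.2, rfl⟩
    · rintro ⟨m, hm, rfl⟩
      have hb : 1 ≤ m ∧ m < cs.length := by
        have := hm
        unfold pvCutB at this
        simp only [Bool.and_eq_true, decide_eq_true_eq] at this
        exact ⟨this.1.1.1, this.1.1.2⟩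
      exact ⟨m, (pvMemCutsFrom P cs cs.length 0 m).mpr ⟨by omega, by omega, hm⟩, rfl⟩
  · exact hpair

theorem pvMain (text : String) (P : List String) :
    PySem.Str.join ""
      ((PySem.List.enumerate text.toList).foldl
        (fun acc p =>
          if p.1 = PySem.Str.len text - 1 then
            acc ++ [String.ofList [p.2]]
          else
            match PySem.Chars.pyGet? text.toList (p.1 + 1) with
            | none => acc
            | some next =>
              if PySem.Chars.isspace next then acc ++ [String.ofList [p.2]]
              else if P.contains (String.ofList [p.2]) then acc ++ [String.ofList [p.2, ' ']]
              else acc ++ [String.ofList [p.2]]) [])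
    = PySem.Str.join " "
        ((((0 : Int) :: PySem.List.sorted (P.foldl (fun cuts p =>
              if PySem.Str.len p ≠ 1 then cuts
              else pvFindLoop text.toList p.toList (text.toList.length + 1)
                (PySem.Chars.find text.toList p.toList) cuts) PySem.Set.empty)
            (fun x => x) false ++ [(text.toList.length : Int)]).zip
          (((0 : Int) :: PySem.List.sorted (P.foldl (fun cuts p =>
              if PySem.Str.len p ≠ 1 then cuts
              else pvFindLoop text.toList p.toList (text.toList.length + 1)
                (PySem.Chars.find text.toList p.toList) cuts) PySem.Set.empty)
            (fun x => x) false ++ [(text.toList.length : Int)]).tail)).map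
          (fun ab => String.ofList (PySem.Chars.slice text.toList (some ab.1) (some ab.2)))) := by
  have hlen : PySem.Str.len text = (text.toList.length : Int) := by
    simp [PySem.Str.len_eq]
  have hA := pvLoopA P text.toList text.toList 0 rfl []
  simp only [Nat.cast_zero] at hA
  rw [hlen, hA, List.nil_append]
  apply String.toList_inj.mp
  rw [PySem.Str.toList_join, PySem.Str.toList_join, pvSortedCuts text.toList P]
  have hsep0 : ("" : String).toList = ([] : List Char) := rfl
  have hsep1 : (" " : String).toList = [' '] := rfl
  rw [hsep0, hsep1, pvJoinNil, pvPieces_flatten]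
  have hb : ((0 : Int) :: (pvCutsFrom P text.toList text.toList.length 0).map
        (fun j : Nat => (j : Int)) ++ [(text.toList.length : Int)])
      = ((0 : Nat) :: pvCutsFrom P text.toList text.toList.length 0
          ++ [text.toList.length]).map (fun j : Nat => (j : Int)) := by
    simp
  rw [hb]
  have htail : (((0 : Nat) :: pvCutsFrom P text.toList text.toList.length 0
        ++ [text.toList.length]).map (fun j : Nat => (j : Int))).tail
      = (pvCutsFrom P text.toList text.toList.length 0
          ++ [text.toList.length]).map (fun j : Nat => (j : Int)) := by
    simp
  rw [htail, List.zip_map]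
  have hmaps : (List.map String.toList
      ((((0 :: pvCutsFrom P text.toList text.toList.length 0 ++ [text.toList.length]).zip
          (pvCutsFrom P text.toList text.toList.length 0 ++ [text.toList.length])).map
        (Prod.map (fun j : Nat => (j : Int)) (fun j : Nat => (j : Int)))).map
        (fun ab => String.ofList (PySem.Chars.slice text.toList (some ab.1) (some ab.2)))))
      = (((0 :: pvCutsFrom P text.toList text.toList.length 0 ++ [text.toList.length]).zip
          (pvCutsFrom P text.toList text.toList.length 0 ++ [text.toList.length])).map
        (fun ab => (text.toList.drop ab.1).take (ab.2 - ab.1))) := by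
    rw [List.map_map, List.map_map]
    apply List.map_congr_left
    intro ab _
    simp only [Function.comp_def, Prod.map, String.toList_ofList,
      PySem.Chars.slice_eq_listSlice, PySem.List.slice_natCast]
  rw [hmaps, pvJoinSplice text.toList (pvCutsFrom P text.toList text.toList.length 0) 0,
    pvSpliceCutsFrom P text.toList text.toList.length 0 (by omega), List.drop_zero]

-- ===== VERDICT (by name: the statement is the Claim_ definition above) =====
theorem split_leading_punct_spec : Claim_equal_split_leading_punct := by
  intro text punctuation _
  unfold Spec_split_leading_punct split_leading_punct split_leading_punct_alt
  exact pvMain text _
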